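-- pv_equiv track=rewrite | github.com/ljwljy51/Algorithm | Programmers/코딩테스트_고득점_Kit/Greedy/level1_체육복.py | solution
-- ===== SOURCE A (Python) =====
-- def solution(n, lost, reserve):
--     lost_mod = list(set(lost) - set(reserve))
--     reserve_mod = list(set(reserve) - set(lost))  # 여분 가져왔는데 도난당한 경우 고려 위함
--     reserve_mod.sort()
--
--     for reserve_num in reserve_mod:  # 왼쪽부터 검사. 비교 기준을 "빌려주는 사람"으로 해야 함. 이걸 캐치 못해서 헤맴
--         if reserve_num - 1 in lost_mod:
--             lost_mod.remove(reserve_num - 1)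
--         elif reserve_num + 1 in lost_mod:
--             lost_mod.remove(reserve_num + 1)
--     return n - len(lost_mod)
-- ===== SOURCE B (Python) =====
-- def solution(n, lost, reserve):
--     L = sorted(set(lost) - set(reserve))
--     R = sorted(set(reserve) - set(lost))
--     i = j = m = 0
--     while i < len(L) and j < len(R):
--         if R[j] < L[i] - 1:
--             j += 1            # this reserve can lend to nobody remaining
--         elif R[j] > L[i] + 1:
--             i += 1            # this lost student can never borrow
--         else:
--             m += 1            # adjacent: lend
--             i += 1
--             j += 1
--     return n - (len(L) - m)
-- ===== Notes on version B (the rewrite author's own statement) =====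
-- stated objective: faster
-- what changed: Replaces A's per-reserve membership-test-and-remove over a mutated lost list (linear scans inside the loop) by a two-pointer merge scan of the two sorted deduplicated lists that counts matches without mutating anything.
import Mathlib
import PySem

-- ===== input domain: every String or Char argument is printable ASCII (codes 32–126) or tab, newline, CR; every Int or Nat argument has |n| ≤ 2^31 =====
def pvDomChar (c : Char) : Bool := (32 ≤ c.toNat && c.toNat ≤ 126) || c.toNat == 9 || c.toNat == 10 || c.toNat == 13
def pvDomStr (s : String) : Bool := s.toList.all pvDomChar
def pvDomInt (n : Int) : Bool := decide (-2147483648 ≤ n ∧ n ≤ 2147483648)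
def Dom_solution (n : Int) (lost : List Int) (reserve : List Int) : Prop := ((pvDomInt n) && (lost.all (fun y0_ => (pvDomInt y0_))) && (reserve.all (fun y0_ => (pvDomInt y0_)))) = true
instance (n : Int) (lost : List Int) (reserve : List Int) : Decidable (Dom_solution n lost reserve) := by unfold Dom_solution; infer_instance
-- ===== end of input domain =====

-- B replaces A's membership-test-and-remove loop over a mutated lost list by a
-- two-pointer merge scan of the two sorted deduplicated lists (alternative algorithm, same cost).
-- A's result does not depend on Python's set iteration order (only membership/removal counts),
-- so the first-occurrence order of PySem.Set is an exact port.

-- ===== PORT A =====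
-- one step of A's for-loop body (lost_mod is the mutated state)
def stepA (lm : List Int) (r : Int) : List Int :=
  if (r - 1) ∈ lm then (PySem.List.remove? lm (r - 1)).getD lm
  else if (r + 1) ∈ lm then (PySem.List.remove? lm (r + 1)).getD lm
  else lm

def solution (n : Int) (lost : List Int) (reserve : List Int) : Int :=
  let lost_mod := PySem.Set.diff (PySem.Set.ofList lost) (PySem.Set.ofList reserve)
  let reserve_mod := PySem.List.sorted
      (PySem.Set.diff (PySem.Set.ofList reserve) (PySem.Set.ofList lost)) (fun x => x) false
  n - (reserve_mod.foldl stepA lost_mod).length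

-- ===== PORT B =====
-- two-pointer scan of the sorted lists; consuming the lists is the i/j index walk of Source B
def twoPtr : List Int → List Int → Int
  | [], _ => 0
  | _ :: _, [] => 0
  | l :: ls, r :: rs =>
    if r < l - 1 then twoPtr (l :: ls) rs
    else if r > l + 1 then twoPtr ls (r :: rs)
    else 1 + twoPtr ls rs
termination_by ls rs => ls.length + rs.length

def solution_alt (n : Int) (lost : List Int) (reserve : List Int) : Int :=
  let L := PySem.List.sorted
      (PySem.Set.diff (PySem.Set.ofList lost) (PySem.Set.ofList reserve)) (fun x => x) false
  let R := PySem.List.sorted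
      (PySem.Set.diff (PySem.Set.ofList reserve) (PySem.Set.ofList lost)) (fun x => x) false
  n - ((L.length : Int) - twoPtr L R)

-- ===== PRECONDITION & SPEC =====
def Spec_solution (n : Int) (lost : List Int) (reserve : List Int) (out : Int) : Prop := out = solution_alt n lost reserve
instance (n : Int) (lost : List Int) (reserve : List Int) (out : Int) : Decidable (Spec_solution n lost reserve out) := by unfold Spec_solution; infer_instance

-- ===== CLAIM (what is proved, stated in full; the proofs are below) =====
def Claim_equal_solution : Prop := ∀ (n : Int) (lost : List Int) (reserve : List Int), Dom_solution n lost reserve → Spec_solution n lost reserve (solution n lost reserve)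

-- ===== LEMMAS AND PROOFS =====

-- stepA respects permutation of the lost state
theorem stepA_perm (lm lm' : List Int) (r : Int) (h : lm.Perm lm') :
    (stepA lm r).Perm (stepA lm' r) := by
  unfold stepA
  by_cases h1 : (r - 1) ∈ lm
  · have h1' : (r - 1) ∈ lm' := h.mem_iff.mp h1
    rw [if_pos h1, if_pos h1', PySem.List.remove?_eq_some_erase _ _ h1,
        PySem.List.remove?_eq_some_erase _ _ h1']
    exact h.erase _
  · have h1' : (r - 1) ∉ lm' := fun hc => h1 (h.mem_iff.mpr hc)
    rw [if_neg h1, if_neg h1']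
    by_cases h2 : (r + 1) ∈ lm
    · have h2' : (r + 1) ∈ lm' := h.mem_iff.mp h2
      rw [if_pos h2, if_pos h2', PySem.List.remove?_eq_some_erase _ _ h2,
          PySem.List.remove?_eq_some_erase _ _ h2']
      exact h.erase _
    · have h2' : (r + 1) ∉ lm' := fun hc => h2 (h.mem_iff.mpr hc)
      rw [if_neg h2, if_neg h2']
      exact h

theorem foldA_perm (rs : List Int) (lm lm' : List Int) (h : lm.Perm lm') :
    (rs.foldl stepA lm).Perm (rs.foldl stepA lm') := by
  induction rs generalizing lm lm' with
  | nil => exact h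
  | cons r rs ih => exact ih _ _ (stepA_perm _ _ _ h)

theorem foldA_nil (rs : List Int) : rs.foldl stepA [] = [] := by
  induction rs with
  | nil => rfl
  | cons r rs ih => simpa [stepA] using ih

-- if every reserve is > l+1, the head l is inert for the whole loop
theorem foldA_cons_big (rs : List Int) (l : Int) (ls : List Int)
    (h : ∀ r ∈ rs, l + 1 < r) :
    rs.foldl stepA (l :: ls) = l :: rs.foldl stepA ls := by
  induction rs generalizing ls with
  | nil => rfl
  | cons r rs ih =>
    have hr := h r (List.mem_cons_self ..)
    have step_eq : stepA (l :: ls) r = l :: stepA ls r := by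
      unfold stepA
      have hne1 : r - 1 ≠ l := by omega
      have hne2 : r + 1 ≠ l := by omega
      by_cases h1 : (r - 1) ∈ ls
      · rw [if_pos (List.mem_cons_of_mem _ h1), if_pos h1,
            PySem.List.remove?_eq_some_erase _ _ (List.mem_cons_of_mem _ h1),
            PySem.List.remove?_eq_some_erase _ _ h1, List.erase_cons_tail (by simp [hne1.symm])]
        rfl
      · have hm1 : (r - 1) ∉ l :: ls := by simp [hne1, h1]
        rw [if_neg hm1, if_neg h1]
        by_cases h2 : (r + 1) ∈ ls
        · rw [if_pos (List.mem_cons_of_mem _ h2), if_pos h2,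
              PySem.List.remove?_eq_some_erase _ _ (List.mem_cons_of_mem _ h2),
              PySem.List.remove?_eq_some_erase _ _ h2, List.erase_cons_tail (by simp [hne2.symm])]
          rfl
        · have hm2 : (r + 1) ∉ l :: ls := by simp [hne2, h2]
          rw [if_neg hm2, if_neg h2]
    rw [List.foldl_cons, step_eq, List.foldl_cons, ih _ (fun r' hr' => h r' (List.mem_cons_of_mem _ hr'))]

theorem twoPtr_nil_right (ls : List Int) : twoPtr ls [] = 0 := by
  cases ls <;> simp [twoPtr]

-- the core correspondence: A's loop leaves exactly (|ls| - twoPtr ls rs) lost students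
theorem foldA_length (ls rs : List Int)
    (hls : ls.Pairwise (· < ·)) (hrs : rs.Pairwise (· < ·))
    (hdisj : ∀ x ∈ ls, x ∉ rs) :
    ((rs.foldl stepA ls).length : Int) = (ls.length : Int) - twoPtr ls rs := by
  induction hn : ls.length + rs.length using Nat.strong_induction_on generalizing ls rs with
  | _ k ih =>
  match ls, rs with
  | [], rs => simp [foldA_nil, twoPtr]
  | l :: ls, [] => simp [twoPtr_nil_right]
  | l :: ls, r :: rs =>
    have hl_min : ∀ x ∈ ls, l < x := fun x hx => (List.pairwise_cons.mp hls).1 x hx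
    have hr_min : ∀ x ∈ rs, r < x := fun x hx => (List.pairwise_cons.mp hrs).1 x hx
    have hls' := (List.pairwise_cons.mp hls).2
    have hrs' := (List.pairwise_cons.mp hrs).2
    have hlr : l ≠ r := fun he => hdisj l (List.mem_cons_self ..) (he ▸ List.mem_cons_self ..)
    by_cases hc1 : r < l - 1
    · -- r lends to nobody: step is identity
      have step_eq : stepA (l :: ls) r = l :: ls := by
        unfold stepA
        have h1 : (r - 1) ∉ l :: ls := by
          intro h; rcases List.mem_cons.mp h with h | h
          · omega
          · have := hl_min _ h; omega
        have h2 : (r + 1) ∉ l :: ls := by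
          intro h; rcases List.mem_cons.mp h with h | h
          · omega
          · have := hl_min _ h; omega
        rw [if_neg h1, if_neg h2]
      rw [List.foldl_cons, step_eq, twoPtr, if_pos hc1]
      exact ih ((l :: ls).length + rs.length) (by simp only [List.length_cons] at hn ⊢; omega) _ _ hls hrs'
        (fun x hx => fun hc => hdisj x hx (List.mem_cons_of_mem _ hc)) rfl
    · by_cases hc2 : l + 1 < r
      · -- l can never borrow: l is inert
        have hall : ∀ r' ∈ r :: rs, l + 1 < r' := by
          intro r' hr'; rcases List.mem_cons.mp hr' with h | h
          · omega
          · have := hr_min _ h; omega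
        rw [foldA_cons_big _ _ _ hall, twoPtr, if_neg hc1, if_pos hc2]
        have := ih (ls.length + (r :: rs).length) (by simp only [List.length_cons] at hn ⊢; omega) ls (r :: rs) hls' hrs
          (fun x hx => hdisj x (List.mem_cons_of_mem _ hx)) rfl
        simp only [List.length_cons] at *
        push_cast at *
        omega
      · -- adjacent: r = l - 1 or r = l + 1; A removes l
        have step_eq : stepA (l :: ls) r = ls := by
          unfold stepA
          by_cases he : r = l + 1
          · have h1 : (r - 1) ∈ l :: ls := by simp [he]
            rw [if_pos h1, PySem.List.remove?_eq_some_erase _ _ h1]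
            simp [he]
          · have hrl : r = l - 1 := by omega
            have h1 : (r - 1) ∉ l :: ls := by
              intro h; rcases List.mem_cons.mp h with h | h
              · omega
              · have := hl_min _ h; omega
            have h2 : (r + 1) ∈ l :: ls := by
              have hx : r + 1 = l := by omega
              simp [hx]
            rw [if_neg h1, if_pos h2, PySem.List.remove?_eq_some_erase _ _ h2]
            have : r + 1 = l := by omega
            simp [this]
        rw [List.foldl_cons, step_eq, twoPtr, if_neg hc1, if_neg hc2]
        have := ih (ls.length + rs.length) (by simp only [List.length_cons] at hn ⊢; omega) ls rs hls' hrs'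
          (fun x hx hc => hdisj x (List.mem_cons_of_mem _ hx) (List.mem_cons_of_mem _ hc)) rfl
        simp only [List.length_cons]
        push_cast at *
        omega

-- ===== VERDICT (by name: the statement is the Claim_ definition above) =====
theorem solution_spec : Claim_equal_solution := by
  intro n lost reserve _
  unfold Spec_solution solution solution_alt
  set Ld := PySem.Set.diff (PySem.Set.ofList lost) (PySem.Set.ofList reserve) with hLd
  set Rd := PySem.Set.diff (PySem.Set.ofList reserve) (PySem.Set.ofList lost) with hRd
  set L := PySem.List.sorted Ld (fun x => x) false with hL
  set R := PySem.List.sorted Rd (fun x => x) false with hR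
  have hLperm : L.Perm Ld := PySem.List.sorted_perm ..
  have hLnodup : Ld.Nodup := PySem.Set.nodup_diff _ _ (PySem.Set.nodup_ofList _)
  have hLsort : L.Pairwise (· < ·) := by
    have hle : L.Pairwise (· ≤ ·) := by
      simpa using PySem.List.sorted_pairwise (xs := Ld) (key := fun x => x)
    have hnd : L.Nodup := hLperm.nodup_iff.mpr hLnodup
    exact hle.imp₂ (fun a b hab hne => lt_of_le_of_ne hab hne) hnd
  have hRsort : R.Pairwise (· < ·) := by
    have hle : R.Pairwise (· ≤ ·) := by
      simpa using PySem.List.sorted_pairwise (xs := Rd) (key := fun x => x)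
    have hnd : R.Nodup :=
      (PySem.List.sorted_perm ..).nodup_iff.mpr (PySem.Set.nodup_diff _ _ (PySem.Set.nodup_ofList _))
    exact hle.imp₂ (fun a b hab hne => lt_of_le_of_ne hab hne) hnd
  have hdisj : ∀ x ∈ L, x ∉ R := by
    intro x hx hxR
    have hx1 : x ∈ Ld := hLperm.mem_iff.mp hx
    have hx2 : x ∈ Rd := (PySem.List.sorted_perm ..).mem_iff.mp hxR
    rw [hLd, PySem.Set.mem_diff] at hx1
    rw [hRd, PySem.Set.mem_diff] at hx2
    exact hx1.2 ((PySem.Set.mem_ofList _ _).mpr ((PySem.Set.mem_ofList _ _).mp hx2.1))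
  have hperm : (R.foldl stepA Ld).Perm (R.foldl stepA L) := foldA_perm _ _ _ hLperm.symm
  have hlen : (R.foldl stepA Ld).length = (R.foldl stepA L).length := hperm.length_eq
  have hmain := foldA_length L R hLsort hRsort hdisj
  have hLL : L.length = Ld.length := hLperm.length_eq
  show n - ((R.foldl stepA Ld).length : Int) = n - ((L.length : Int) - twoPtr L R)
  omega
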